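-- pv_equiv track=rewrite | github.com/antoKeinanen/tira25k | viikko10/coinsum.py | can_create
-- ===== SOURCE A (Python) =====
-- def can_create(coins, target):
--     result = {}
--
--     result[0] = 0
--     for s in range(1, target+1):
--         for c in coins:
--             if s - c >= 0 and s-c in result:
--                 result[s] = result[s - c] + 1
--     return target in result
-- ===== SOURCE B (Python) =====
-- def can_create(coins, target):
--     # BFS worklist over reachable sums: expand a frontier of newly reached sums,
--     # visiting only sums that are actually reachable (instead of scanning all 1..target).
--     if target < 0:
--         return False
--     pos = [c for c in coins if c > 0]
--     reached = {0}
--     frontier = [0]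
--     while frontier:
--         new = []
--         for r in frontier:
--             for c in pos:
--                 s = r + c
--                 if s <= target and s not in reached:
--                     reached.add(s)
--                     new.append(s)
--         frontier = new
--     return target in reached
-- ===== Notes on version B (the rewrite author's own statement) =====
-- stated objective: alternative
-- what changed: B replaces A's bottom-up DP that scans every sum s in 1..target against every coin (a dict keyed by reachable sums) with a breadth-first worklist search: a frontier of newly reached sums is expanded by adding each positive coin, so only sums that are actually reachable are ever visited.
import Mathlib
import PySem

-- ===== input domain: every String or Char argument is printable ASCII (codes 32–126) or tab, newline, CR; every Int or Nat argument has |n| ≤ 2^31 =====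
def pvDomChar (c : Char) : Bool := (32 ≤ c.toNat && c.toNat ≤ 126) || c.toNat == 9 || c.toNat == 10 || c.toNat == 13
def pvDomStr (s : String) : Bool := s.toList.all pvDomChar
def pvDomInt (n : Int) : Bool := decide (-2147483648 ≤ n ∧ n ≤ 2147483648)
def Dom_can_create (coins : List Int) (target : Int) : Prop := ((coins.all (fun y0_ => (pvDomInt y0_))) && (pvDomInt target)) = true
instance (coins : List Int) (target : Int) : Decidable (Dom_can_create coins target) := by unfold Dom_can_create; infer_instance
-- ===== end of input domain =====

-- B replaces A's bottom-up dict DP over every sum 1..target by a breadth-first worklist search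
-- over the reachable sums only (a set plus a frontier list), expanded with the positive coins.


-- ===== PORT A =====
def can_create (coins : List Int) (target : Int) : Bool :=
  let result : PySem.Dict Int Int := PySem.Dict.empty
  let result := result.insert 0 0
  let result :=
    (PySem.List.pyRange 1 (target + 1) 1).foldl
      (fun result s =>
        coins.foldl
          (fun result c =>
            if decide (0 ≤ s - c) && result.contains (s - c) then
              result.insert s (result.getD (s - c) 0 + 1)
            else result)
          result)
      result
  result.contains target

-- ===== PORT B =====
-- inner double loop of one BFS round: for r in frontier: for c in pos: …
def bfsInner (pos : List Int) (target : Int) (p : PySem.Set Int × List Int) (r : Int) :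
    PySem.Set Int × List Int :=
  pos.foldl
    (fun p c =>
      let s := r + c
      if decide (s ≤ target) && !(PySem.Set.contains p.1 s) then
        (PySem.Set.add p.1 s, p.2 ++ [s])
      else p)
    p

-- the 'while frontier:' loop; fuel (target+2 at the call site) is a totality guard only:
-- every member of the k-th frontier is ≥ k, so the frontier is empty before fuel runs out.
def bfsLoop (pos : List Int) (target : Int) : Nat → PySem.Set Int → List Int → PySem.Set Int
  | 0, reached, _ => reached
  | fuel + 1, reached, frontier =>
      if frontier.isEmpty then reached
      else
        let q := frontier.foldl (bfsInner pos target) (reached, [])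
        bfsLoop pos target fuel q.1 q.2

def can_create_alt (coins : List Int) (target : Int) : Bool :=
  if decide (target < 0) then false
  else
    let pos := coins.filter (fun c => decide (0 < c))
    let reached : PySem.Set Int := PySem.Set.ofList [0]
    PySem.Set.contains (bfsLoop pos target ((target + 1).toNat + 1) reached [0]) target

-- ===== PRECONDITION & SPEC =====
def Spec_can_create (coins : List Int) (target : Int) (out : Bool) : Prop := out = can_create_alt coins target
instance (coins : List Int) (target : Int) (out : Bool) : Decidable (Spec_can_create coins target out) := by unfold Spec_can_create; infer_instance

-- ===== CLAIM (what is proved, stated in full; the proofs are below) =====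
def Claim_equal_can_create : Prop := ∀ (coins : List Int) (target : Int), Dom_can_create coins target → Spec_can_create coins target (can_create coins target)

-- ===== LEMMAS AND PROOFS =====

/-- `CoinReach cs x`: x is a sum of finitely many positive members of cs (with repetition).
Both programs return true exactly on `0 ≤ target ∧ CoinReach coins target`. -/
inductive CoinReach (cs : List Int) : Int → Prop
  | zero : CoinReach cs 0
  | add {s c : Int} : c ∈ cs → 0 < c → CoinReach cs s → CoinReach cs (s + c)

lemma coinReach_nonneg {cs : List Int} {x : Int} (h : CoinReach cs x) : 0 ≤ x := by
  induction h with
  | zero => omega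
  | add _ hpos _ ih => omega

lemma coinReach_mono {cs cs' : List Int} {x : Int} (hsub : ∀ c ∈ cs, c ∈ cs')
    (h : CoinReach cs x) : CoinReach cs' x := by
  induction h with
  | zero => exact .zero
  | add hm hpos _ ih => exact .add (hsub _ hm) hpos ih

lemma coinReach_inv {cs : List Int} {x : Int} (h : CoinReach cs x) (hx : x ≠ 0) :
    ∃ c ∈ cs, 0 < c ∧ CoinReach cs (x - c) := by
  cases h with
  | zero => exact absurd rfl hx
  | @add s c hm hpos hp =>
      refine ⟨c, hm, hpos, ?_⟩
      have hs : s + c - c = s := by ring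
      rw [hs]; exact hp

lemma coinReach_filter_pos (coins : List Int) (x : Int) :
    CoinReach (coins.filter (fun c => decide (0 < c))) x ↔ CoinReach coins x := by
  constructor
  · exact coinReach_mono (fun c hc => (List.mem_filter.mp hc).1)
  · intro h
    induction h with
    | zero => exact .zero
    | add hm hpos _ ih =>
        exact .add (List.mem_filter.mpr ⟨hm, by simpa using hpos⟩) hpos ih

-- ============ A-side ============

lemma A_inner (s : Int) (old : PySem.Dict Int Int) (hs : old.contains s = false) :
    ∀ (cs : List Int) (d : PySem.Dict Int Int),
      (∀ x, x ≠ s → d.contains x = old.contains x) →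
      (∀ x, x ≠ s →
        (cs.foldl (fun d c => if decide (0 ≤ s - c) && d.contains (s - c) then d.insert s (d.getD (s - c) 0 + 1) else d) d).contains x = old.contains x) ∧
      ((cs.foldl (fun d c => if decide (0 ≤ s - c) && d.contains (s - c) then d.insert s (d.getD (s - c) 0 + 1) else d) d).contains s = true ↔
        d.contains s = true ∨ ∃ c ∈ cs, 0 ≤ s - c ∧ old.contains (s - c) = true) := by
  intro cs
  induction cs with
  | nil =>
      intro d hd
      refine ⟨hd, ?_⟩
      simp
  | cons c cs ih =>
      intro d hd
      simp only [List.foldl_cons]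
      have hd1 : ∀ x, x ≠ s →
          (if decide (0 ≤ s - c) && d.contains (s - c) then d.insert s (d.getD (s - c) 0 + 1) else d).contains x = old.contains x := by
        intro x hx
        split
        · rw [PySem.Dict.contains_insert]
          have hxs : (x == s) = false := by simpa using hx
          rw [hxs, Bool.false_or]
          exact hd x hx
        · exact hd x hx
      have hstep : (if decide (0 ≤ s - c) && d.contains (s - c) then d.insert s (d.getD (s - c) 0 + 1) else d).contains s = true ↔
          d.contains s = true ∨ (0 ≤ s - c ∧ old.contains (s - c) = true) := by
        split
        · rename_i hcond
          simp only [Bool.and_eq_true, decide_eq_true_eq] at hcond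
          constructor
          · intro _
            by_cases hc0 : c = 0
            · subst hc0
              left
              have he : s - 0 = s := by ring
              rw [he] at hcond
              exact hcond.2
            · right
              refine ⟨hcond.1, ?_⟩
              rw [← hd (s - c) (by omega)]
              exact hcond.2
          · intro _
            rw [PySem.Dict.contains_insert]
            simp
        · rename_i hcond
          simp only [Bool.and_eq_true, decide_eq_true_eq, not_and] at hcond
          constructor
          · exact Or.inl
          · rintro (h | ⟨h1, h2⟩)
            · exact h
            · exfalso
              by_cases hc0 : c = 0
              · subst hc0
                have he : s - 0 = s := by ring
                rw [he, hs] at h2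
                exact Bool.noConfusion h2
              · have heq : d.contains (s - c) = old.contains (s - c) := hd _ (by omega)
                have := hcond h1
                rw [heq, h2] at this
                exact this rfl
      obtain ⟨ha, hb⟩ := ih _ hd1
      refine ⟨ha, ?_⟩
      rw [hb, hstep, List.exists_mem_cons_iff]
      tauto

lemma A_outer (coins : List Int) : ∀ (n : Nat) (x : Int),
    ((PySem.List.pyRange 1 ((n : Int) + 1) 1).foldl
        (fun d s => coins.foldl
          (fun d c => if decide (0 ≤ s - c) && d.contains (s - c) then d.insert s (d.getD (s - c) 0 + 1) else d) d)
        ((PySem.Dict.empty : PySem.Dict Int Int).insert 0 0)).contains x = true ↔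
      0 ≤ x ∧ x ≤ (n : Int) ∧ CoinReach coins x := by
  intro n
  induction n with
  | zero =>
      intro x
      rw [PySem.List.pyRange_one_eq_nil (by omega)]
      simp only [List.foldl_nil]
      rw [PySem.Dict.contains_insert]
      simp only [PySem.Dict.contains_empty, Bool.or_false, beq_iff_eq]
      constructor
      · rintro rfl
        exact ⟨by omega, by omega, .zero⟩
      · rintro ⟨h1, h2, _⟩
        omega
  | succ n ih =>
      intro x
      have hsplit : PySem.List.pyRange 1 ((↑(n + 1) : Int) + 1) 1
          = PySem.List.pyRange 1 ((n : Int) + 1) 1 ++ [(n : Int) + 1] := by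
        rw [show ((↑(n + 1) : Int) + 1) = ((n : Int) + 1) + 1 by push_cast; ring]
        exact PySem.List.pyRange_one_succ_right (by omega)
      rw [hsplit, List.foldl_append]
      set dn := (PySem.List.pyRange 1 ((n : Int) + 1) 1).foldl
        (fun d s => coins.foldl
          (fun d c => if decide (0 ≤ s - c) && d.contains (s - c) then d.insert s (d.getD (s - c) 0 + 1) else d) d)
        ((PySem.Dict.empty : PySem.Dict Int Int).insert 0 0) with hdn
      have hsfalse : dn.contains ((n : Int) + 1) = false := by
        rw [Bool.eq_false_iff]
        intro h
        obtain ⟨_, h2, _⟩ := (ih _).mp h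
        omega
      obtain ⟨huns, hmem⟩ := A_inner ((n : Int) + 1) dn hsfalse coins dn (fun _ _ => rfl)
      simp only [List.foldl_cons, List.foldl_nil]
      by_cases hx : x = (n : Int) + 1
      · subst hx
        rw [hmem, hsfalse]
        simp only [Bool.false_eq_true, false_or]
        constructor
        · rintro ⟨c, hc, h1, h2⟩
          obtain ⟨hy0, hyn, hyr⟩ := (ih _).mp h2
          refine ⟨by omega, by push_cast; omega, ?_⟩
          have h3 := CoinReach.add (cs := coins) (s := (n : Int) + 1 - c) (c := c) hc (by omega) hyr
          have he : (n : Int) + 1 - c + c = (n : Int) + 1 := by ring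
          rw [he] at h3; exact h3
        · rintro ⟨h0, hle, hr⟩
          obtain ⟨c, hc, hcpos, hr'⟩ := coinReach_inv hr (by omega)
          have h0' := coinReach_nonneg hr'
          refine ⟨c, hc, by omega, ?_⟩
          exact (ih _).mpr ⟨by omega, by omega, hr'⟩
      · rw [huns x hx, ih x]
        push_cast
        constructor <;> rintro ⟨h1, h2, h3⟩ <;> exact ⟨h1, by omega, h3⟩

lemma A_char (coins : List Int) (target : Int) :
    can_create coins target = true ↔ 0 ≤ target ∧ CoinReach coins target := by
  by_cases ht : 0 ≤ target
  · obtain ⟨n, rfl⟩ : ∃ n : Nat, target = (n : Int) := ⟨target.toNat, by omega⟩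
    simp only [can_create]
    rw [A_outer coins n ((n : Int))]
    constructor
    · rintro ⟨_, _, hr⟩; exact ⟨by omega, hr⟩
    · rintro ⟨_, hr⟩; exact ⟨by omega, by omega, hr⟩
  · simp only [can_create]
    rw [PySem.List.pyRange_one_eq_nil (by omega)]
    simp only [List.foldl_nil]
    rw [PySem.Dict.contains_insert]
    simp only [PySem.Dict.contains_empty, Bool.or_false, beq_iff_eq]
    constructor
    · rintro rfl; omega
    · rintro ⟨h, _⟩; omega

-- ============ B-side ============

lemma bfsInner_char (target r : Int) :
    ∀ (pos : List Int) (p : PySem.Set Int × List Int), p.1.Nodup →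
      (bfsInner pos target p r).1.Nodup ∧
      (∀ x, x ∈ (bfsInner pos target p r).1 ↔ (x ∈ p.1 ∨ ∃ c ∈ pos, x = r + c ∧ x ≤ target)) ∧
      (∀ x, x ∈ (bfsInner pos target p r).2 ↔
        (x ∈ p.2 ∨ (x ∈ (bfsInner pos target p r).1 ∧ x ∉ p.1))) := by
  intro pos
  induction pos with
  | nil =>
      intro p hnd
      refine ⟨hnd, fun x => by simp [bfsInner], fun x => by simp [bfsInner]⟩
  | cons c cs ih =>
      intro p hnd
      have hunf : bfsInner (c :: cs) target p r
          = bfsInner cs target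
              (if decide (r + c ≤ target) && !(PySem.Set.contains p.1 (r + c)) then
                 (PySem.Set.add p.1 (r + c), p.2 ++ [r + c]) else p) r := by
        simp only [bfsInner, List.foldl_cons]
      rw [hunf]
      by_cases hcond : r + c ≤ target ∧ (r + c) ∉ p.1
      · have hif : (if decide (r + c ≤ target) && !(PySem.Set.contains p.1 (r + c)) then
             (PySem.Set.add p.1 (r + c), p.2 ++ [r + c]) else p)
             = (PySem.Set.add p.1 (r + c), p.2 ++ [r + c]) := by
          have h1 : decide (r + c ≤ target) = true := by simpa using hcond.1
          have h2 : PySem.Set.contains p.1 (r + c) = false := by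
            rw [Bool.eq_false_iff]
            intro h
            exact hcond.2 ((PySem.Set.contains_iff _ _).mp h)
          rw [h1, h2]; rfl
        rw [hif]
        obtain ⟨ihnd, ih1, ih2⟩ := ih (PySem.Set.add p.1 (r + c), p.2 ++ [r + c])
          (PySem.Set.nodup_add _ _ hnd)
        refine ⟨ihnd, fun x => ?_, fun x => ?_⟩
        · rw [ih1 x]
          simp only [PySem.Set.mem_add, List.exists_mem_cons_iff]
          constructor
          · rintro ((h | rfl) | h)
            · exact Or.inl h
            · exact Or.inr (Or.inl ⟨rfl, hcond.1⟩)
            · exact Or.inr (Or.inr h)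
          · rintro (h | (⟨rfl, _⟩ | h))
            · exact Or.inl (Or.inl h)
            · exact Or.inl (Or.inr rfl)
            · exact Or.inr h
        · have hsin : (r + c) ∈ (bfsInner cs target (PySem.Set.add p.1 (r + c), p.2 ++ [r + c]) r).1 := by
            rw [ih1]
            exact Or.inl (by simp [PySem.Set.mem_add])
          rw [ih2 x]
          simp only [PySem.Set.mem_add, List.mem_append, List.mem_singleton]
          by_cases hx : x = r + c
          · subst hx
            simp only [hsin, hcond.2]
            tauto
          · tauto
      · have hif : (if decide (r + c ≤ target) && !(PySem.Set.contains p.1 (r + c)) then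
             (PySem.Set.add p.1 (r + c), p.2 ++ [r + c]) else p) = p := by
          rcases not_and_or.mp hcond with h | h
          · have : decide (r + c ≤ target) = false := by simpa using h
            rw [this]; rfl
          · have : PySem.Set.contains p.1 (r + c) = true :=
              (PySem.Set.contains_iff _ _).mpr (not_not.mp h)
            rw [this]
            simp
        rw [hif]
        obtain ⟨ihnd, ih1, ih2⟩ := ih p hnd
        refine ⟨ihnd, fun x => ?_, ih2⟩
        rw [ih1 x]
        simp only [List.exists_mem_cons_iff]
        constructor
        · tauto
        · rintro (h | (⟨rfl, hle⟩ | h))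
          · exact Or.inl h
          · rcases not_and_or.mp hcond with h' | h'
            · exact absurd hle h'
            · exact Or.inl (not_not.mp h')
          · exact Or.inr h

lemma bfsRound_char (pos : List Int) (target : Int) :
    ∀ (fr : List Int) (p : PySem.Set Int × List Int), p.1.Nodup →
      (fr.foldl (bfsInner pos target) p).1.Nodup ∧
      (∀ x, x ∈ (fr.foldl (bfsInner pos target) p).1 ↔
        (x ∈ p.1 ∨ ∃ r ∈ fr, ∃ c ∈ pos, x = r + c ∧ x ≤ target)) ∧
      (∀ x, x ∈ (fr.foldl (bfsInner pos target) p).2 ↔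
        (x ∈ p.2 ∨ (x ∈ (fr.foldl (bfsInner pos target) p).1 ∧ x ∉ p.1))) := by
  intro fr
  induction fr with
  | nil =>
      intro p hnd
      exact ⟨hnd, fun x => by simp, fun x => by simp⟩
  | cons r rs ih =>
      intro p hnd
      simp only [List.foldl_cons]
      obtain ⟨pnd, p1, p2⟩ := bfsInner_char target r pos p hnd
      obtain ⟨qnd, q1, q2⟩ := ih (bfsInner pos target p r) pnd
      have hmono : ∀ x, x ∈ (bfsInner pos target p r).1 →
          x ∈ (rs.foldl (bfsInner pos target) (bfsInner pos target p r)).1 := by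
        intro x hx
        rw [q1]; exact Or.inl hx
      have hmono0 : ∀ x, x ∈ p.1 → x ∈ (bfsInner pos target p r).1 := by
        intro x hx
        rw [p1]; exact Or.inl hx
      refine ⟨qnd, fun x => ?_, fun x => ?_⟩
      · rw [q1, p1]
        simp only [List.exists_mem_cons_iff]
        rw [or_assoc]
      · rw [q2, p2 x]
        constructor
        · rintro (( h | ⟨h1, h2⟩) | ⟨h1, h2⟩)
          · exact Or.inl h
          · exact Or.inr ⟨hmono x h1, h2⟩
          · refine Or.inr ⟨h1, fun hx => h2 (hmono0 x hx)⟩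
        · rintro (h | ⟨h1, h2⟩)
          · exact Or.inl (Or.inl h)
          · by_cases hx : x ∈ (bfsInner pos target p r).1
            · exact Or.inl (Or.inr ⟨hx, h2⟩)
            · exact Or.inr ⟨h1, hx⟩

lemma closed_char (pos : List Int) (target : Int) (reached : PySem.Set Int)
    (hsound : ∀ x ∈ reached, 0 ≤ x ∧ x ≤ target ∧ CoinReach pos x)
    (hzero : (0 : Int) ∈ reached)
    (hclosed : ∀ x ∈ reached, ∀ c ∈ pos, x + c ≤ target → (x + c) ∈ reached) :
    ∀ y, y ∈ reached ↔ (0 ≤ y ∧ y ≤ target ∧ CoinReach pos y) := by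
  have haux : ∀ y, CoinReach pos y → y ≤ target → y ∈ reached := by
    intro y hr
    induction hr with
    | zero => intro _; exact hzero
    | @add s c hm hpos hprev ih =>
        intro hle
        have hs0 := coinReach_nonneg hprev
        exact hclosed s (ih (by omega)) c hm hle
  intro y
  exact ⟨hsound y, fun ⟨_, h1, h2⟩ => haux y h2 h1⟩

lemma bfsLoop_char (pos : List Int) (target : Int) (hpos : ∀ c ∈ pos, 0 < c) :
    ∀ (fuel : Nat) (reached : PySem.Set Int) (frontier : List Int),
      reached.Nodup →
      (∀ x ∈ frontier, x ∈ reached) →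
      (∀ x ∈ reached, 0 ≤ x ∧ x ≤ target ∧ CoinReach pos x) →
      (0 : Int) ∈ reached →
      (∀ x ∈ reached, ∀ c ∈ pos, x + c ≤ target → (x + c) ∈ reached ∨ x ∈ frontier) →
      (∀ x ∈ frontier, target + 1 - (fuel : Int) ≤ x) →
      ∀ y, y ∈ bfsLoop pos target fuel reached frontier ↔ (0 ≤ y ∧ y ≤ target ∧ CoinReach pos y) := by
  intro fuel
  induction fuel with
  | zero =>
      intro reached frontier _ hsub hsound hzero hclosed hge
      have hfr : frontier = [] := by
        rcases frontier with _ | ⟨x, xs⟩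
        · rfl
        · exfalso
          have h1 := (hsound x (hsub x (List.mem_cons_self))).2.1
          have h2 := hge x List.mem_cons_self
          push_cast at h2
          omega
      subst hfr
      exact closed_char pos target reached hsound hzero
        (fun x hx c hc hle => (hclosed x hx c hc hle).resolve_right (by simp))
  | succ fuel ih =>
      intro reached frontier hnd hsub hsound hzero hclosed hge
      by_cases hfr : frontier.isEmpty
      · have : bfsLoop pos target (fuel + 1) reached frontier = reached := by
          simp [bfsLoop, hfr]
        rw [this]
        have hfr' : frontier = [] := List.isEmpty_iff.mp hfr
        subst hfr'
        exact closed_char pos target reached hsound hzero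
          (fun x hx c hc hle => (hclosed x hx c hc hle).resolve_right (by simp))
      · have hstep : bfsLoop pos target (fuel + 1) reached frontier
            = bfsLoop pos target fuel
                (frontier.foldl (bfsInner pos target) (reached, [])).1
                (frontier.foldl (bfsInner pos target) (reached, [])).2 := by
          simp [bfsLoop, hfr]
        rw [hstep]
        obtain ⟨qnd, q1, q2⟩ := bfsRound_char pos target frontier (reached, []) hnd
        -- the pair's second component starts empty, so q2 simplifies
        have q2' : ∀ x, x ∈ (frontier.foldl (bfsInner pos target) (reached, [])).2 ↔
            (x ∈ (frontier.foldl (bfsInner pos target) (reached, [])).1 ∧ x ∉ reached) := by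
          intro x
          rw [q2 x]
          simp
        apply ih _ _ qnd
        · intro x hx
          exact ((q2' x).mp hx).1
        · intro x hx
          rcases (q1 x).mp hx with h | ⟨r, hr, c, hc, rfl, hle⟩
          · exact hsound x h
          · have hrs := hsound r (hsub r hr)
            have hcpos := hpos c hc
            exact ⟨by omega, hle, .add hc hcpos hrs.2.2⟩
        · rw [q1]; exact Or.inl hzero
        · intro x hx c hc hle
          by_cases hxnew : x ∈ (frontier.foldl (bfsInner pos target) (reached, [])).2
          · exact Or.inr hxnew
          · have hxr : x ∈ reached := by
              by_contra hxr
              exact hxnew ((q2' x).mpr ⟨hx, hxr⟩)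
            rcases hclosed x hxr c hc hle with h | h
            · exact Or.inl ((q1 (x + c)).mpr (Or.inl h))
            · exact Or.inl ((q1 (x + c)).mpr (Or.inr ⟨x, h, c, hc, rfl, hle⟩))
        · intro x hx
          obtain ⟨hx1, hx2⟩ := (q2' x).mp hx
          rcases (q1 x).mp hx1 with h | ⟨r, hr, c, hc, rfl, hle⟩
          · exact absurd h hx2
          · have hr' := hge r hr
            have hcpos := hpos c hc
            push_cast at hr' ⊢
            omega

lemma B_char (coins : List Int) (target : Int) :
    can_create_alt coins target = true ↔ 0 ≤ target ∧ CoinReach coins target := by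
  by_cases ht : target < 0
  · simp only [can_create_alt, ht, decide_true, if_true]
    constructor
    · intro h; exact absurd h (by simp)
    · rintro ⟨h, _⟩; omega
  · have ht' : 0 ≤ target := by omega
    have hunf : can_create_alt coins target
        = PySem.Set.contains
            (bfsLoop (coins.filter (fun c => decide (0 < c))) target ((target + 1).toNat + 1)
              (PySem.Set.ofList [0]) [0]) target := by
      simp [can_create_alt, ht]
    rw [hunf]
    set pos := coins.filter (fun c => decide (0 < c)) with hpos_def
    have hpos : ∀ c ∈ pos, 0 < c := by
      intro c hc
      have := (List.mem_filter.mp hc).2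
      simpa using this
    have h0 : (PySem.Set.ofList [(0 : Int)]) = [0] := rfl
    have hchar := bfsLoop_char pos target hpos ((target + 1).toNat + 1)
      (PySem.Set.ofList [0]) [0]
      (by rw [h0]; simp)
      (by intro x hx; rw [h0]; simpa using hx)
      (by
        intro x hx
        rw [h0] at hx
        simp only [List.mem_singleton] at hx
        subst hx
        exact ⟨le_refl 0, ht', .zero⟩)
      (by rw [h0]; simp)
      (by
        intro x hx c hc hle
        rw [h0] at hx
        simp only [List.mem_singleton] at hx
        exact Or.inr (by simp [hx]))
      (by
        intro x hx
        simp only [List.mem_singleton] at hx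
        subst hx
        push_cast
        omega)
      target
    rw [PySem.Set.contains_iff, hchar, coinReach_filter_pos]
    constructor
    · rintro ⟨_, _, h⟩; exact ⟨ht', h⟩
    · rintro ⟨_, h⟩; exact ⟨ht', le_refl _, h⟩

-- ===== VERDICT (by name: the statement is the Claim_ definition above) =====
theorem can_create_spec : Claim_equal_can_create := by
  intro coins target _
  show can_create coins target = can_create_alt coins target
  rw [Bool.eq_iff_iff, A_char, B_char]
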